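-- pv_equiv track=rewrite | github.com/skywhat/leetcode | Python/1554.py | differByOne
-- ===== SOURCE A (Python) =====
-- def differByOne(dict):
--     """
--     :type dict: List[str]
--     :rtype: bool
--     """
--     n = len(dict[0])
--     nwords = len(dict)
--     for i in range(n):
--         seen = set()
--         for j in range(nwords):
--             t = dict[j][:i] + "*" + dict[j][i+1:]
--             if t in seen:
--                 return True
--             seen.add(t)
--     return False
-- ===== SOURCE B (Python) =====
-- def differByOne(dict):
--     """
--     :type dict: List[str]
--     :rtype: bool
--     """
--     n = len(dict[0])
--     for j, w1 in enumerate(dict):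
--         for w2 in dict[j + 1:]:
--             if any(w1[:i] == w2[:i] and w1[i + 1:] == w2[i + 1:] for i in range(n)):
--                 return True
--     return False
-- ===== Notes on version B (the rewrite author's own statement) =====
-- stated objective: alternative
-- what changed: Replaces the column-wise scan that hashes a wildcard string per word per position into a set with a direct pairwise comparison of words: for each pair j<k it checks whether some position i<n has equal prefixes and equal suffixes, dropping the set and the wildcard-string construction entirely.
import Mathlib
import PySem

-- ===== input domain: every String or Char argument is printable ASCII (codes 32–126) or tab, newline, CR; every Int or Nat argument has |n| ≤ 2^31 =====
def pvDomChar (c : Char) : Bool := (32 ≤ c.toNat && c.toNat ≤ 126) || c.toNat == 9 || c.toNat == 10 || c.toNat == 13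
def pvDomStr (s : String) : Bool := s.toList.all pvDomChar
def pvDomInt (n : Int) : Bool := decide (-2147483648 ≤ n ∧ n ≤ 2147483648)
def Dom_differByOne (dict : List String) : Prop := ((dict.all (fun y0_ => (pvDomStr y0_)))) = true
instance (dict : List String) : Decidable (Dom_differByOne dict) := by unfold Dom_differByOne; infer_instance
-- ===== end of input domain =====

-- B replaces A's column-wise wildcard-set scan by a direct pairwise prefix/suffix comparison
-- (alternative decomposition, similar cost); equivalence is about the return value.

-- ===== PORT A =====
-- t = dict[j][:i] + "*" + dict[j][i+1:]  (on code points)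
def pvWildA (w : List Char) (i : Int) : List Char :=
  PySem.List.slice w none (some i) ++ '*' :: PySem.List.slice w (some (i + 1)) none

-- inner 'for j in range(nwords)' loop with the seen-set and early return
def pvColLoop (i : Int) (ws : List (List Char)) (seen : PySem.Set (List Char)) : Bool :=
  match ws with
  | [] => false
  | w :: rest =>
    let t := pvWildA w i
    if PySem.Set.contains seen t then true else pvColLoop i rest (PySem.Set.add seen t)

def differByOne (dict : List String) : Bool :=
  let n : Int := PySem.Str.len (dict.headD "")   -- len(dict[0]); Pre_ excludes the empty list
  (PySem.List.pyRange 0 n 1).any (fun i => pvColLoop i (dict.map String.toList) PySem.Set.empty)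

-- ===== PORT B =====
-- any(w1[:i] == w2[:i] and w1[i+1:] == w2[i+1:] for i in range(n))
def pvCloseB (n : Int) (w1 w2 : List Char) : Bool :=
  (PySem.List.pyRange 0 n 1).any (fun i =>
    (PySem.List.slice w1 none (some i) == PySem.List.slice w2 none (some i)) &&
    (PySem.List.slice w1 (some (i + 1)) none == PySem.List.slice w2 (some (i + 1)) none))

-- 'for j, w1 in enumerate(dict): for w2 in dict[j+1:]' as structural recursion over suffixes
def pvPairsLoop (n : Int) : List (List Char) → Bool
  | [] => false
  | w :: rest => rest.any (pvCloseB n w) || pvPairsLoop n rest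

def differByOne_alt (dict : List String) : Bool :=
  let n : Int := PySem.Str.len (dict.headD "")
  pvPairsLoop n (dict.map String.toList)

-- ===== PRECONDITION & SPEC =====
-- Both Pythons raise IndexError on the empty list (dict[0]); Pre_ excludes exactly that input.
def Pre_differByOne (dict : List String) : Prop := dict ≠ []
instance (dict : List String) : Decidable (Pre_differByOne dict) := by unfold Pre_differByOne; infer_instance
def pvWitness_differByOne : List String := ["abc", "abd"]

def Spec_differByOne (dict : List String) (out : Bool) : Prop := out = differByOne_alt dict
instance (dict : List String) (out : Bool) : Decidable (Spec_differByOne dict out) := by unfold Spec_differByOne; infer_instance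

-- ===== CLAIM (what is proved, stated in full; the proofs are below) =====
def Claim_equal_differByOne : Prop := ∀ (dict : List String), Dom_differByOne dict → Pre_differByOne dict → Spec_differByOne dict (differByOne dict)

-- ===== LEMMAS AND PROOFS =====

-- generic pairwise-any over the suffixes of a list (proof-side view of B's loop shape)
def pvPairsAny (p : List Char → List Char → Bool) : List (List Char) → Bool
  | [] => false
  | w :: rest => rest.any (p w) || pvPairsAny p rest

lemma pvPairsLoop_eq (n : Int) (ws : List (List Char)) :
    pvPairsLoop n ws = pvPairsAny (pvCloseB n) ws := by
  induction ws with
  | nil => rfl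
  | cons w rest ih => simp [pvPairsLoop, pvPairsAny, ih]

-- A's seen-set loop finds a duplicate wildcard iff some word hits the seen set
-- or two words in the remaining list have equal wildcards
lemma pvColLoop_eq (i : Int) (ws : List (List Char)) (seen : PySem.Set (List Char)) :
    pvColLoop i ws seen
      = ((ws.any fun w => PySem.Set.contains seen (pvWildA w i))
         || pvPairsAny (fun a b => pvWildA a i == pvWildA b i) ws) := by
  induction ws generalizing seen with
  | nil => rfl
  | cons w rest ih =>
    by_cases hm : pvWildA w i ∈ seen
    · simp [pvColLoop, hm]
    · have hstep : pvColLoop i (w :: rest) seen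
          = pvColLoop i rest (PySem.Set.add seen (pvWildA w i)) := by
        simp [pvColLoop, hm]
      rw [hstep, ih, Bool.eq_iff_iff]
      simp only [pvPairsAny, List.any_cons, List.any_eq_true, Bool.or_eq_true,
        PySem.Set.contains_eq_listContains, List.contains_iff_mem, PySem.Set.mem_add,
        beq_iff_eq]
      constructor
      · rintro (⟨x, hx, (h | h)⟩ | h)
        · exact Or.inl (Or.inr ⟨x, hx, h⟩)
        · exact Or.inr (Or.inl ⟨x, hx, h.symm⟩)
        · exact Or.inr (Or.inr h)
      · rintro ((h | ⟨x, hx, h⟩) | (⟨x, hx, h⟩ | h))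
        · exact absurd h hm
        · exact Or.inl ⟨x, hx, Or.inl h⟩
        · exact Or.inl ⟨x, hx, Or.inr h.symm⟩
        · exact Or.inr h

-- the wildcard strings of two words agree at position k iff prefixes and suffixes agree
lemma pvWild_iff (w1 w2 : List Char) (k : Nat) :
    (w1.take k ++ '*' :: w1.drop (k + 1) = w2.take k ++ '*' :: w2.drop (k + 1))
      ↔ (w1.take k = w2.take k ∧ w1.drop (k + 1) = w2.drop (k + 1)) := by
  constructor
  · intro h
    have hl := congrArg List.length h
    simp only [List.length_append, List.length_cons, List.length_take, List.length_drop] at hl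
    have htk : (w1.take k).length = (w2.take k).length := by
      simp only [List.length_take]; omega
    obtain ⟨h1, h2⟩ := List.append_inj h htk
    exact ⟨h1, by injection h2⟩
  · rintro ⟨h1, h2⟩; rw [h1, h2]

-- per-pair: testing all positions of a word pair equals B's closeness test
lemma pvPerPair (n : Int) :
    (fun a b => (PySem.List.pyRange 0 n 1).any fun i => pvWildA a i == pvWildA b i)
      = pvCloseB n := by
  funext a b
  apply PySem.List.any_congr_mem
  intro i hi
  have h0 : 0 ≤ i := (PySem.List.mem_pyRange_one.mp hi).1
  obtain ⟨k, rfl⟩ := Int.eq_ofNat_of_zero_le h0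
  have h1 : (k : Int) + 1 = ((k + 1 : Nat) : Int) := by push_cast; ring
  rw [Bool.eq_iff_iff]
  simp only [pvWildA, h1, PySem.List.slice_to_natCast, PySem.List.slice_from_natCast,
    beq_iff_eq, Bool.and_eq_true]
  exact pvWild_iff a b k

-- swap the i-loop with the pair-loop
lemma pvSwap (r : List Int) (q : Int → List Char → List Char → Bool) (l : List (List Char)) :
    r.any (fun i => pvPairsAny (q i) l) = pvPairsAny (fun a b => r.any fun i => q i a b) l := by
  induction l with
  | nil => simp [pvPairsAny]
  | cons w rest ih =>
    rw [Bool.eq_iff_iff]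
    simp only [pvPairsAny, List.any_eq_true, Bool.or_eq_true, ← ih]
    constructor
    · rintro ⟨i, hi, ⟨b, hb, hq⟩ | h⟩
      · exact Or.inl ⟨b, hb, i, hi, hq⟩
      · exact Or.inr ⟨i, hi, h⟩
    · rintro (⟨b, hb, i, hi, hq⟩ | ⟨i, hi, h⟩)
      · exact ⟨i, hi, Or.inl ⟨b, hb, hq⟩⟩
      · exact ⟨i, hi, Or.inr h⟩

-- ===== VERDICT (by name: the statement is the Claim_ definition above) =====
theorem differByOne_spec : Claim_equal_differByOne := by
  intro dict _ _
  unfold Spec_differByOne differByOne differByOne_alt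
  simp only [pvColLoop_eq, pvPairsLoop_eq, ← pvPerPair, ← pvSwap]
  apply PySem.List.any_congr_mem
  intro i _
  simp [PySem.Set.empty]
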